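-- pv_equiv track=rewrite | github.com/douzujun/Python-Foundation-Suda | 上机题目和面试题整理/Python-Foundation-Suda-master/05_leetcode/1252_奇数值单元格的数目.py | oddCells2
-- ===== SOURCE A (Python) =====
-- def oddCells2(n, m, indices):
--     # 模拟+空间优化
--     row = [0] * n
--     col = [0] * m
--     for i, j in indices:
--         row[i] += 1
--         col[j] += 1
--     count = 0
--     for i in range(n):
--         for j in range(m):
--             if (row[i] + col[j]) % 2 != 0:
--                 count += 1
--     return count
-- ===== SOURCE B (Python) =====
-- def oddCells2(n, m, indices):
--     # Track only row/column parities, then combine with a closed form: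
--     # a cell (i, j) is odd iff exactly one of row i, column j was hit an odd number of times.
--     row_par = [0] * n
--     col_par = [0] * m
--     for i, j in indices:
--         row_par[i] ^= 1
--         col_par[j] ^= 1
--     r, c = sum(row_par), sum(col_par)
--     return r * (m - c) + (n - r) * c
-- ===== Notes on version B (the rewrite author's own statement) =====
-- stated objective: faster
-- what changed: Replaces the O(n*m) scan of every grid cell by 0/1 row/column parity arrays and the closed form r*(m-c)+(n-r)*c over their sums.
import Mathlib
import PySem

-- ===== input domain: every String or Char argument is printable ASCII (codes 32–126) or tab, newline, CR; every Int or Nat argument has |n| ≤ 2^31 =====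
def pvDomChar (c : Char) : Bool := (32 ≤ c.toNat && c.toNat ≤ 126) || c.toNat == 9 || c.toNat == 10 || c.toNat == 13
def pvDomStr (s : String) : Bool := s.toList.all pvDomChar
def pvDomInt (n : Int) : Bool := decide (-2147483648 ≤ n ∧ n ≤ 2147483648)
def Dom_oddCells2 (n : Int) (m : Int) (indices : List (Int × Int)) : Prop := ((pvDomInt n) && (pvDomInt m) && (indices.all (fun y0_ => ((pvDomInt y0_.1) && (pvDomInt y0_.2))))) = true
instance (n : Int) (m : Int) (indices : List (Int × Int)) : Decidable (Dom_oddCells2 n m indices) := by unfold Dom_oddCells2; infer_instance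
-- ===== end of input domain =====

-- B replaces A's O(n*m) scan of the whole grid by 0/1 row/column parity arrays combined
-- with the closed form r*(m-c)+(n-r)*c over their sums.

-- ===== PORT A =====
-- row[i] += 1 is pySetD/pyGetD (exact wherever the index is within Python's wrap range,
-- which Pre_ guarantees; outside it Python raises IndexError).
def oddCells2 (n : Int) (m : Int) (indices : List (Int × Int)) : Int :=
  let rc := indices.foldl
      (fun (rc : List Int × List Int) (p : Int × Int) =>
        (PySem.List.pySetD rc.1 p.1 (PySem.List.pyGetD rc.1 p.1 0 + 1),
         PySem.List.pySetD rc.2 p.2 (PySem.List.pyGetD rc.2 p.2 0 + 1)))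
      (List.replicate n.toNat (0 : Int), List.replicate m.toNat (0 : Int))
  (PySem.List.pyRange 0 n 1).foldl (fun count i =>
    (PySem.List.pyRange 0 m 1).foldl (fun count j =>
      if PySem.Int.mod (PySem.List.pyGetD rc.1 i 0 + PySem.List.pyGetD rc.2 j 0) 2 ≠ 0
      then count + 1 else count) count) 0

-- ===== PORT B =====
-- row_par[i] ^= 1 is pySetD/pyGetD with Int.bxor; sum(...) is List.sum.
def oddCells2_alt (n : Int) (m : Int) (indices : List (Int × Int)) : Int :=
  let pc := indices.foldl
      (fun (pc : List Int × List Int) (p : Int × Int) =>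
        (PySem.List.pySetD pc.1 p.1 (PySem.Int.bxor (PySem.List.pyGetD pc.1 p.1 0) 1),
         PySem.List.pySetD pc.2 p.2 (PySem.Int.bxor (PySem.List.pyGetD pc.2 p.2 0) 1)))
      (List.replicate n.toNat (0 : Int), List.replicate m.toNat (0 : Int))
  let r := pc.1.sum
  let c := pc.2.sum
  r * (m - c) + (n - r) * c

-- ===== PRECONDITION & SPEC =====
-- Pre_ is exactly A's (and B's) returning domain: every index within Python's wrap range
-- of its axis; outside it both programs raise IndexError.
def Pre_oddCells2 (n : Int) (m : Int) (indices : List (Int × Int)) : Prop :=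
  ∀ p ∈ indices, (-(n.toNat : Int) ≤ p.1 ∧ p.1 < (n.toNat : Int))
    ∧ (-(m.toNat : Int) ≤ p.2 ∧ p.2 < (m.toNat : Int))
instance (n : Int) (m : Int) (indices : List (Int × Int)) : Decidable (Pre_oddCells2 n m indices) := by
  unfold Pre_oddCells2; infer_instance
def pvWitness_oddCells2 : Int × Int × (List (Int × Int)) := (2, 3, [(0, 1), (1, 2), (0, 1)])

def Spec_oddCells2 (n : Int) (m : Int) (indices : List (Int × Int)) (out : Int) : Prop := out = oddCells2_alt n m indices
instance (n : Int) (m : Int) (indices : List (Int × Int)) (out : Int) : Decidable (Spec_oddCells2 n m indices out) := by unfold Spec_oddCells2; infer_instance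

-- ===== CLAIM (what is proved, stated in full; the proofs are below) =====
def Claim_equal_oddCells2 : Prop := ∀ (n : Int) (m : Int) (indices : List (Int × Int)), Dom_oddCells2 n m indices → Pre_oddCells2 n m indices → Spec_oddCells2 n m indices (oddCells2 n m indices)

-- ===== LEMMAS AND PROOFS =====

-- A's increment step, one component
def pvBump (xs : List Int) (i : Int) : List Int :=
  PySem.List.pySetD xs i (PySem.List.pyGetD xs i 0 + 1)

-- B's parity-flip step, one component
def pvFlip (xs : List Int) (i : Int) : List Int :=
  PySem.List.pySetD xs i (PySem.Int.bxor (PySem.List.pyGetD xs i 0) 1)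

-- Python's normalisation of an in-range (possibly negative) index
def pvWrap (len : Nat) (k : Int) : Nat := if 0 ≤ k then k.toNat else len - (-k).toNat

theorem pyIdx_wrap (len : Nat) (k : Int) (h0 : -(len : Int) ≤ k) (h1 : k < (len : Int)) :
    PySem.List.pyIdx? len k = some (pvWrap len k) := by
  simp only [PySem.List.pyIdx?, pvWrap]
  split_ifs <;> first | rfl | omega

theorem pvWrap_lt (len : Nat) (k : Int) (h0 : -(len : Int) ≤ k) (h1 : k < (len : Int)) :
    pvWrap len k < len := by
  simp only [pvWrap]
  split_ifs <;> omega

theorem pyGetD_wrap (xs : List Int) (k : Int) (d : Int)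
    (h0 : -(xs.length : Int) ≤ k) (h1 : k < (xs.length : Int)) :
    PySem.List.pyGetD xs k d = xs.getD (pvWrap xs.length k) d := by
  simp only [PySem.List.pyGetD, PySem.List.pyGet?, pyIdx_wrap xs.length k h0 h1,
    Option.bind_some, List.getD_eq_getElem?_getD]

theorem pySetD_wrap (xs : List Int) (k : Int) (v : Int)
    (h0 : -(xs.length : Int) ≤ k) (h1 : k < (xs.length : Int)) :
    PySem.List.pySetD xs k v = xs.set (pvWrap xs.length k) v := by
  simp only [PySem.List.pySetD, PySem.List.pySet?, pyIdx_wrap xs.length k h0 h1,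
    Option.map_some, Option.getD_some]

theorem pvBump_len (xs : List Int) (i : Int) : (pvBump xs i).length = xs.length := by
  simp [pvBump, PySem.List.length_pySetD]

theorem bump_foldl_len (ks : List Int) (xs : List Int) :
    (ks.foldl pvBump xs).length = xs.length := by
  induction ks generalizing xs with
  | nil => rfl
  | cons k ks ih => rw [List.foldl_cons, ih, pvBump_len]

-- flipping a 0/1 parity is adding 1 mod 2
theorem mod_flip (x : Int) :
    PySem.Int.bxor (PySem.Int.mod x 2) 1 = PySem.Int.mod (x + 1) 2 := by
  have h2 : PySem.Int.mod (x + 1) 2 = 1 - PySem.Int.mod x 2 := by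
    rw [PySem.Int.mod_eq_emod_of_pos (by norm_num), PySem.Int.mod_eq_emod_of_pos (by norm_num)]
    omega
  rcases PySem.Int.mod_two_eq x with h | h <;> rw [h2, h] <;> decide

-- the parity of a sum splits into the two parities
theorem par_cond (a b : Int) :
    (decide (PySem.Int.mod (a + b) 2 ≠ 0))
      = ((decide (PySem.Int.mod a 2 = 1)) != (decide (PySem.Int.mod b 2 = 1))) := by
  rw [PySem.Int.mod_eq_emod_of_pos (by norm_num), PySem.Int.mod_eq_emod_of_pos (by norm_num),
    PySem.Int.mod_eq_emod_of_pos (by norm_num)]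
  by_cases h1 : a % 2 = 1 <;> by_cases h2 : b % 2 = 1 <;>
    simp [h1, h2] <;> omega

-- B's parity array mirrors A's count array entry by entry, through the same index wraps
theorem bump_flip (ks : List Int) (xs ys : List Int) (hlen : ys.length = xs.length)
    (hks : ∀ k ∈ ks, -(xs.length : Int) ≤ k ∧ k < (xs.length : Int))
    (hinv : ∀ t, t < xs.length → ys.getD t 0 = PySem.Int.mod (xs.getD t 0) 2) :
    (ks.foldl pvFlip ys).length = xs.length ∧
      ∀ t, t < xs.length →
        (ks.foldl pvFlip ys).getD t 0 = PySem.Int.mod ((ks.foldl pvBump xs).getD t 0) 2 := by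
  induction ks generalizing xs ys with
  | nil => exact ⟨hlen, hinv⟩
  | cons k ks ih =>
    obtain ⟨hk0, hk1⟩ := hks k (by simp)
    have hw : pvWrap xs.length k < xs.length := pvWrap_lt _ _ hk0 hk1
    have hxs' : pvBump xs k = xs.set (pvWrap xs.length k) (xs.getD (pvWrap xs.length k) 0 + 1) := by
      rw [pvBump, pyGetD_wrap xs k 0 hk0 hk1, pySetD_wrap xs k _ hk0 hk1]
    have hys' : pvFlip ys k
        = ys.set (pvWrap xs.length k) (PySem.Int.bxor (ys.getD (pvWrap xs.length k) 0) 1) := by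
      rw [pvFlip, pyGetD_wrap ys k 0 (by omega) (by omega),
        pySetD_wrap ys k _ (by omega) (by omega), hlen]
    have hlen' : (pvFlip ys k).length = (pvBump xs k).length := by
      rw [hxs', hys', List.length_set, List.length_set, hlen]
    have hlenB : (pvBump xs k).length = xs.length := pvBump_len xs k
    simp only [List.foldl_cons]
    have := ih (pvBump xs k) (pvFlip ys k) hlen'
      (by intro a ha
          rw [hlenB]
          exact hks a (by simp [ha]))
      (by intro t ht
          rw [hlenB] at ht
          have hty : t < ys.length := by omega
          rw [hxs', hys']
          have hy1 : (ys.set (pvWrap xs.length k) (PySem.Int.bxor (ys.getD (pvWrap xs.length k) 0) 1)).getD t 0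
              = (ys.set (pvWrap xs.length k) (PySem.Int.bxor (ys.getD (pvWrap xs.length k) 0) 1))[t]'(by simp [hty]) :=
            List.getD_eq_getElem _ _ (by simp [hty])
          have hx1 : (xs.set (pvWrap xs.length k) (xs.getD (pvWrap xs.length k) 0 + 1)).getD t 0
              = (xs.set (pvWrap xs.length k) (xs.getD (pvWrap xs.length k) 0 + 1))[t]'(by simp [ht]) :=
            List.getD_eq_getElem _ _ (by simp [ht])
          rw [hy1, hx1, List.getElem_set, List.getElem_set]
          split_ifs with hwt
          · rw [hinv _ hw, mod_flip]
          · rw [← List.getD_eq_getElem ys 0 hty, ← List.getD_eq_getElem xs 0 ht]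
            exact hinv t ht)
    rw [hlenB] at this
    exact this

-- a counting loop is a countP
theorem foldl_ite_count {α : Type} (P : α → Prop) [DecidablePred P] (l : List α) (a : Int) :
    l.foldl (fun acc x => if P x then acc + 1 else acc) a
      = a + (l.countP (fun x => decide (P x)) : Int) := by
  induction l generalizing a with
  | nil => simp
  | cons x l ih =>
    simp only [List.foldl_cons, List.countP_cons, ih, decide_eq_true_eq]
    by_cases h : P x
    · rw [if_pos h, if_pos h]
      push_cast
      omega
    · rw [if_neg h, if_neg h]
      push_cast
      omega

-- a sum of a two-valued map
theorem sum_map_ite {α : Type} (l : List α) (p : α → Bool) (x y : Int) :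
    (l.map (fun v => if p v then x else y)).sum
      = (l.countP p : Int) * x + ((l.length : Int) - (l.countP p : Int)) * y := by
  induction l with
  | nil => simp
  | cons v l ih =>
    simp only [List.map_cons, List.sum_cons, List.countP_cons, List.length_cons, ih]
    by_cases h : p v = true <;> simp only [h, if_true, if_false] <;> push_cast <;> ring

-- ===== VERDICT (by name: the statement is the Claim_ definition above) =====
theorem oddCells2_spec : Claim_equal_oddCells2 := by
  intro n m indices _ hpre
  unfold Spec_oddCells2 oddCells2 oddCells2_alt
  have hfs : ∀ k ∈ indices.map Prod.fst, -(n.toNat : Int) ≤ k ∧ k < (n.toNat : Int) := by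
    intro k hk
    obtain ⟨p, hp, rfl⟩ := List.mem_map.mp hk
    exact (hpre p hp).1
  have hss : ∀ k ∈ indices.map Prod.snd, -(m.toNat : Int) ≤ k ∧ k < (m.toNat : Int) := by
    intro k hk
    obtain ⟨p, hp, rfl⟩ := List.mem_map.mp hk
    exact (hpre p hp).2
  -- split the paired folds into components
  have hA : (indices.foldl
      (fun (rc : List Int × List Int) (p : Int × Int) =>
        (PySem.List.pySetD rc.1 p.1 (PySem.List.pyGetD rc.1 p.1 0 + 1),
         PySem.List.pySetD rc.2 p.2 (PySem.List.pyGetD rc.2 p.2 0 + 1)))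
      (List.replicate n.toNat (0 : Int), List.replicate m.toNat (0 : Int)))
      = ((indices.map Prod.fst).foldl pvBump (List.replicate n.toNat (0 : Int)),
         (indices.map Prod.snd).foldl pvBump (List.replicate m.toNat (0 : Int))) := by
    rw [List.foldl_map, List.foldl_map]
    exact PySem.List.foldl_prod_mk (fun s x => pvBump s x.1) (fun s x => pvBump s x.2)
      indices _ _
  have hB : (indices.foldl
      (fun (pc : List Int × List Int) (p : Int × Int) =>
        (PySem.List.pySetD pc.1 p.1 (PySem.Int.bxor (PySem.List.pyGetD pc.1 p.1 0) 1),
         PySem.List.pySetD pc.2 p.2 (PySem.Int.bxor (PySem.List.pyGetD pc.2 p.2 0) 1)))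
      (List.replicate n.toNat (0 : Int), List.replicate m.toNat (0 : Int)))
      = ((indices.map Prod.fst).foldl pvFlip (List.replicate n.toNat (0 : Int)),
         (indices.map Prod.snd).foldl pvFlip (List.replicate m.toNat (0 : Int))) := by
    rw [List.foldl_map, List.foldl_map]
    exact PySem.List.foldl_prod_mk (fun s x => pvFlip s x.1) (fun s x => pvFlip s x.2)
      indices _ _
  simp only [hA, hB]
  set fs := indices.map Prod.fst with hfsdef
  set ss := indices.map Prod.snd with hssdef
  set R := fs.foldl pvBump (List.replicate n.toNat (0 : Int)) with hRdef
  set C := ss.foldl pvBump (List.replicate m.toNat (0 : Int)) with hCdef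
  set P := fs.foldl pvFlip (List.replicate n.toNat (0 : Int)) with hPdef
  set Q := ss.foldl pvFlip (List.replicate m.toNat (0 : Int)) with hQdef
  have hRlen : R.length = n.toNat := by rw [hRdef, bump_foldl_len, List.length_replicate]
  have hClen : C.length = m.toNat := by rw [hCdef, bump_foldl_len, List.length_replicate]
  obtain ⟨hPlen, hPinv⟩ := bump_flip fs (List.replicate n.toNat (0 : Int))
    (List.replicate n.toNat (0 : Int)) rfl
    (by intro k hk; simpa using hfs k hk)
    (by intro t ht
        simp only [List.length_replicate] at ht
        rw [List.getD_eq_getElem _ _ (by simpa using ht), List.getElem_replicate]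
        decide)
  obtain ⟨hQlen, hQinv⟩ := bump_flip ss (List.replicate m.toNat (0 : Int))
    (List.replicate m.toNat (0 : Int)) rfl
    (by intro k hk; simpa using hss k hk)
    (by intro t ht
        simp only [List.length_replicate] at ht
        rw [List.getD_eq_getElem _ _ (by simpa using ht), List.getElem_replicate]
        decide)
  rw [← hPdef] at hPlen hPinv
  rw [← hQdef] at hQlen hQinv
  rw [← hRdef] at hPinv
  rw [← hCdef] at hQinv
  simp only [List.length_replicate] at hPlen hPinv hQlen hQinv
  set pR := fun i : Int => decide (PySem.Int.mod (PySem.List.pyGetD R i 0) 2 = 1) with hpRdef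
  set pC := fun j : Int => decide (PySem.Int.mod (PySem.List.pyGetD C j 0) 2 = 1) with hpCdef
  set cntR := (PySem.List.pyRange 0 n 1).countP pR with hcntR
  set cntC := (PySem.List.pyRange 0 m 1).countP pC with hcntC
  -- the A side equals the closed form over toNat sizes
  have hinner : ∀ i ∈ PySem.List.pyRange 0 n 1,
      ((PySem.List.pyRange 0 m 1).countP
        (fun j => decide (PySem.Int.mod (PySem.List.pyGetD R i 0 + PySem.List.pyGetD C j 0) 2 ≠ 0)) : Int)
      = (if pR i then ((m.toNat : Int) - (cntC : Int)) else (cntC : Int)) := by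
    intro i _
    have hcong : (PySem.List.pyRange 0 m 1).countP
        (fun j => decide (PySem.Int.mod (PySem.List.pyGetD R i 0 + PySem.List.pyGetD C j 0) 2 ≠ 0))
        = (PySem.List.pyRange 0 m 1).countP (fun j => pR i != pC j) := by
      apply List.countP_congr
      intro j _
      rw [par_cond, hpRdef, hpCdef]
    rw [hcong]
    have hlenm : (PySem.List.pyRange 0 m 1).length = m.toNat := by
      rw [PySem.List.length_pyRange_one]; omega
    by_cases hp : pR i = true
    · rw [if_pos hp]
      have h1 : (PySem.List.pyRange 0 m 1).countP (fun j => pR i != pC j)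
          = (PySem.List.pyRange 0 m 1).countP (fun j => !(pC j)) := by
        apply List.countP_congr
        intro j _
        simp [hp]
      have h2 := List.length_eq_countP_add_countP (p := pC) (l := PySem.List.pyRange 0 m 1)
      have h3 : (PySem.List.pyRange 0 m 1).countP (fun a => decide ¬ pC a = true)
          = (PySem.List.pyRange 0 m 1).countP (fun j => !(pC j)) := by
        apply List.countP_congr
        intro j _
        simp
      rw [h1]
      rw [h3] at h2
      rw [hlenm] at h2
      omega
    · rw [if_neg hp]
      have hp' : pR i = false := by simpa using hp
      have h1 : (PySem.List.pyRange 0 m 1).countP (fun j => pR i != pC j)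
          = (PySem.List.pyRange 0 m 1).countP pC := by
        apply List.countP_congr
        intro j _
        simp [hp']
      rw [h1]
  have hAval : ((PySem.List.pyRange 0 n 1).foldl (fun count i =>
      (PySem.List.pyRange 0 m 1).foldl (fun count j =>
        if PySem.Int.mod (PySem.List.pyGetD R i 0 + PySem.List.pyGetD C j 0) 2 ≠ 0
        then count + 1 else count) count) 0)
      = (cntR : Int) * ((m.toNat : Int) - (cntC : Int))
        + ((n.toNat : Int) - (cntR : Int)) * (cntC : Int) := by
    have hloop : (PySem.List.pyRange 0 n 1).foldl (fun count i =>
        (PySem.List.pyRange 0 m 1).foldl (fun count j =>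
          if PySem.Int.mod (PySem.List.pyGetD R i 0 + PySem.List.pyGetD C j 0) 2 ≠ 0
          then count + 1 else count) count) 0
        = (PySem.List.pyRange 0 n 1).foldl (fun count i => count +
            ((PySem.List.pyRange 0 m 1).countP
              (fun j => decide (PySem.Int.mod (PySem.List.pyGetD R i 0 + PySem.List.pyGetD C j 0) 2 ≠ 0)) : Int)) 0 := by
      apply PySem.List.foldl_congr_mem
      intro acc x _
      exact foldl_ite_count _ _ _
    rw [hloop, PySem.List.foldl_add, zero_add]
    have hmap : (PySem.List.pyRange 0 n 1).map (fun i =>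
        ((PySem.List.pyRange 0 m 1).countP
          (fun j => decide (PySem.Int.mod (PySem.List.pyGetD R i 0 + PySem.List.pyGetD C j 0) 2 ≠ 0)) : Int))
        = (PySem.List.pyRange 0 n 1).map (fun i =>
            if pR i then ((m.toNat : Int) - (cntC : Int)) else (cntC : Int)) :=
      List.map_congr_left hinner
    rw [hmap, sum_map_ite, PySem.List.length_pyRange_one, ← hcntR]
    have hzero : (((n - 0).toNat : Nat) : Int) = ((n.toNat : Nat) : Int) := by omega
    rw [hzero]
  rw [hAval]
  -- the B side: each parity array sums to the number of odd entries
  have hsum : ∀ (X Y : List Int) (len : Nat) (pX : Int → Bool),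
      Y.length = len → X.length = len →
      (∀ t, t < len → Y.getD t 0 = PySem.Int.mod (X.getD t 0) 2) →
      pX = (fun i : Int => decide (PySem.Int.mod (PySem.List.pyGetD X i 0) 2 = 1)) →
      Y.sum = (((len : Int) |> fun L => ((PySem.List.pyRange 0 L 1).countP pX : Int))) := by
    intro X Y len pX hYlen hXlen hYinv hpX
    have hY : Y = (PySem.List.pyRange 0 (Y.length : Int) 1).map (fun j => PySem.List.pyGetD Y j 0) :=
      (PySem.List.map_pyGetD_pyRange_zero' Y 0).symm
    have hmapY : (PySem.List.pyRange 0 (Y.length : Int) 1).map (fun j => PySem.List.pyGetD Y j 0)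
        = (PySem.List.pyRange 0 ((len : Nat) : Int) 1).map (fun j => if pX j then (1 : Int) else 0) := by
      rw [hYlen]
      apply List.map_congr_left
      intro j hj
      rw [PySem.List.mem_pyRange_one] at hj
      have hjlt : j.toNat < len := by omega
      rw [PySem.List.pyGetD_eq_getElem Y 0 hj.1 (by omega),
        ← List.getD_eq_getElem Y 0 (by omega), hYinv _ hjlt, hpX]
      simp only [decide_eq_true_eq]
      rw [PySem.List.pyGetD_eq_getElem X 0 hj.1 (by omega),
        ← List.getD_eq_getElem X 0 (by omega)]
      rcases PySem.Int.mod_two_eq (X.getD j.toNat 0) with h | h <;> rw [h] <;> norm_num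
    calc Y.sum
        = ((PySem.List.pyRange 0 ((len : Nat) : Int) 1).map (fun j => if pX j then (1 : Int) else 0)).sum := by
          rw [← hmapY, ← hY]
      _ = _ := by
          rw [sum_map_ite]
          ring
  have hr : P.sum = (((n.toNat : Nat) : Int) |> fun L => ((PySem.List.pyRange 0 L 1).countP pR : Int)) :=
    hsum R P n.toNat pR hPlen hRlen hPinv hpRdef
  have hc : Q.sum = (((m.toNat : Nat) : Int) |> fun L => ((PySem.List.pyRange 0 L 1).countP pC : Int)) :=
    hsum C Q m.toNat pC hQlen hClen hQinv hpCdef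
  simp only [] at hr hc
  -- identify the ranges over toNat with the ranges over the raw sizes
  have hrange : ∀ k : Int, PySem.List.pyRange 0 ((k.toNat : Nat) : Int) 1 = PySem.List.pyRange 0 k 1 := by
    intro k
    by_cases hk : 0 ≤ k
    · rw [Int.toNat_of_nonneg hk]
    · rw [PySem.List.pyRange_one_eq_nil (by omega), PySem.List.pyRange_one_eq_nil (by omega)]
  rw [hrange] at hr hc
  rw [hr, hc, ← hcntR, ← hcntC]
  -- reconcile the toNat sizes with the Int sizes
  by_cases hind : indices = []
  · have hfse : fs = [] := by rw [hfsdef, hind]; rfl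
    have hsse : ss = [] := by rw [hssdef, hind]; rfl
    have hR0 : R = List.replicate n.toNat (0 : Int) := by rw [hRdef, hfse]; rfl
    have hC0 : C = List.replicate m.toNat (0 : Int) := by rw [hCdef, hsse]; rfl
    have hr0 : cntR = 0 := by
      rw [hcntR, List.countP_eq_zero]
      intro x hx
      rw [PySem.List.mem_pyRange_one] at hx
      have hxlt : x < (n.toNat : Int) := by omega
      rw [hpRdef]
      simp only [decide_eq_true_eq]
      rw [hR0, PySem.List.pyGetD_eq_getElem _ 0 hx.1
          (by simp only [List.length_replicate]; omega), List.getElem_replicate]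
      decide
    have hc0 : cntC = 0 := by
      rw [hcntC, List.countP_eq_zero]
      intro x hx
      rw [PySem.List.mem_pyRange_one] at hx
      have hxlt : x < (m.toNat : Int) := by omega
      rw [hpCdef]
      simp only [decide_eq_true_eq]
      rw [hC0, PySem.List.pyGetD_eq_getElem _ 0 hx.1
          (by simp only [List.length_replicate]; omega), List.getElem_replicate]
      decide
    rw [hr0, hc0]
    push_cast
    ring
  · obtain ⟨p, hp⟩ := List.exists_mem_of_ne_nil indices hind
    obtain ⟨⟨h1, h2⟩, ⟨h3, h4⟩⟩ := hpre p hp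
    have hn : ((n.toNat : Nat) : Int) = n := by omega
    have hm : ((m.toNat : Nat) : Int) = m := by omega
    rw [hn, hm]
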